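-- pv_equiv track=rewrite | github.com/pytorch/pytorch | .venv311/lib/python3.11/site-packages/sympy/core/logic.py | _torf
-- ===== SOURCE A (Python) =====
-- def _torf(args):
--     """Return True if all args are True, False if they
--     are all False, else None.
--
--     >>> from sympy.core.logic import _torf
--     >>> _torf((True, True))
--     True
--     >>> _torf((False, False))
--     False
--     >>> _torf((True, False))
--     """
--     sawT = sawF = False
--     for a in args:
--         if a is True:
--             if sawF:
--                 return
--             sawT = True
--         elif a is False:
--             if sawT:
--                 return
--             sawF = True
--         else:
--             return
--     return sawT
-- ===== SOURCE B (Python) =====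
-- def _torf(args):
--     """Return True if all args are True, False if they
--     are all False, else None."""
--     args = tuple(args)
--     if any(a is not True and a is not False for a in args):
--         return None
--     hasT = any(a is True for a in args)
--     hasF = any(a is False for a in args)
--     return None if hasT and hasF else hasT
-- ===== Notes on version B (the rewrite author's own statement) =====
-- stated objective: alternative
-- what changed: Replaced the fused state-machine loop with early returns by declarative whole-list scans: first reject any non-bool element, then compute hasT/hasF via any() and combine them.
import Mathlib
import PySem

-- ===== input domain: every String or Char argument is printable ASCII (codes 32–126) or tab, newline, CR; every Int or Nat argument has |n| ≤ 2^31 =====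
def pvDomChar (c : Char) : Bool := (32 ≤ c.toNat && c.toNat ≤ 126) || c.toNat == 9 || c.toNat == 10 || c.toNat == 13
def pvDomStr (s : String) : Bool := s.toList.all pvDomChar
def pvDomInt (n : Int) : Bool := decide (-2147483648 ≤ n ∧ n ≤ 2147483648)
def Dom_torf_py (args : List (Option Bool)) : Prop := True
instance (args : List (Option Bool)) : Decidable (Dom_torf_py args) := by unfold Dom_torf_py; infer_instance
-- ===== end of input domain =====

-- B replaces A's fused state-machine loop with early returns by three declarative
-- whole-list scans (non-bool check, hasT, hasF); same cost, different decomposition.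
-- ===== PORT A =====
-- helper: A's for-loop with its state sawT/sawF; early 'return' is 'none'
def torfLoop (args : List (Option Bool)) (sawT sawF : Bool) : Option Bool :=
  match args with
  | [] => some sawT
  | a :: rest =>
    match a with
    | some true  => if sawF then none else torfLoop rest true sawF
    | some false => if sawT then none else torfLoop rest sawT true
    | none       => none

def torf_py (args : List (Option Bool)) : Option Bool :=
  torfLoop args false false

-- ===== PORT B =====
def torf_py_alt (args : List (Option Bool)) : Option Bool :=
  if args.any (fun a => a != some true && a != some false) then none
  else
    let hasT := args.any (fun a => a == some true)
    let hasF := args.any (fun a => a == some false)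
    if hasT && hasF then none else some hasT

-- ===== PRECONDITION & SPEC =====
def Spec_torf_py (args : List (Option Bool)) (out : Option Bool) : Prop := out = torf_py_alt args
instance (args : List (Option Bool)) (out : Option Bool) : Decidable (Spec_torf_py args out) := by unfold Spec_torf_py; infer_instance

-- ===== CLAIM (what is proved, stated in full; the proofs are below) =====
def Claim_equal_torf_py : Prop := ∀ (args : List (Option Bool)), Dom_torf_py args → Spec_torf_py args (torf_py args)

-- ===== LEMMAS AND PROOFS =====

-- ===== VERDICT (by name: the statement is the Claim_ definition above) =====
-- loop invariant: torfLoop's result in terms of the scans over the rest of the list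
theorem torfLoop_eq (args : List (Option Bool)) : ∀ (sawT sawF : Bool), ¬(sawT = true ∧ sawF = true) →
    torfLoop args sawT sawF =
      if args.any (fun a => a != some true && a != some false) then none
      else if (sawT || args.any (fun a => a == some true)) &&
              (sawF || args.any (fun a => a == some false)) then none
      else some (sawT || args.any (fun a => a == some true)) := by
  induction args with
  | nil =>
    intro sawT sawF h
    simp [torfLoop]
    cases sawT <;> cases sawF <;> simp_all
  | cons a rest ih =>
    intro sawT sawF h
    cases a with
    | none => simp [torfLoop]
    | some b =>
      cases b with
      | true =>
        by_cases hF : sawF = true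
        · subst hF
          have hT : sawT = false := by cases sawT <;> simp_all
          subst hT
          simp [torfLoop]
        · have hF' : sawF = false := by cases sawF <;> simp_all
          subst hF'
          simp only [torfLoop]
          rw [ih true false (by decide)]
          simp
      | false =>
        by_cases hT : sawT = true
        · subst hT
          have hF : sawF = false := by cases sawF <;> simp_all
          subst hF
          simp [torfLoop]
        · have hT' : sawT = false := by cases sawT <;> simp_all
          subst hT'
          simp only [torfLoop]
          rw [ih false true (by decide)]
          simp

theorem torf_py_spec : Claim_equal_torf_py := by
  intro args _
  unfold Spec_torf_py torf_py torf_py_alt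
  rw [torfLoop_eq args false false (by simp)]
  simp
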